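-- pv_equiv track=rewrite | github.com/jayaram0550/leetcode_problems | 2553-separate-the-digits-in-an-array/2553-separate-the-digits-in-an-array.py | separateDigits
-- ===== SOURCE A (Python) =====
-- from typing import List
--
-- def separateDigits(nums: List[int]) -> List[int]:
--     a=[]
--     r=0
--     for i in nums:
--         b=[]
--         while i>=10:
--             r=i%10
--             b.append(r)
--             i=i//10
--         a.append(i)
--         a+=(b[::-1])
--
--     return a
-- ===== SOURCE B (Python) =====
-- from typing import List
--
-- def separateDigits(nums: List[int]) -> List[int]:
--     def digits(i: int) -> List[int]:
--         if i < 10: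
--             return [i]
--         return digits(i // 10) + [i % 10]
--     return [d for i in nums for d in digits(i)]
-- ===== Notes on version B (the rewrite author's own statement) =====
-- stated objective: simpler
-- what changed: Replaces the iterative least-significant-first modulo loop with per-number reverse and explicit accumulator by a recursive most-significant-first digit decomposition flattened with a comprehension.
import Mathlib
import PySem

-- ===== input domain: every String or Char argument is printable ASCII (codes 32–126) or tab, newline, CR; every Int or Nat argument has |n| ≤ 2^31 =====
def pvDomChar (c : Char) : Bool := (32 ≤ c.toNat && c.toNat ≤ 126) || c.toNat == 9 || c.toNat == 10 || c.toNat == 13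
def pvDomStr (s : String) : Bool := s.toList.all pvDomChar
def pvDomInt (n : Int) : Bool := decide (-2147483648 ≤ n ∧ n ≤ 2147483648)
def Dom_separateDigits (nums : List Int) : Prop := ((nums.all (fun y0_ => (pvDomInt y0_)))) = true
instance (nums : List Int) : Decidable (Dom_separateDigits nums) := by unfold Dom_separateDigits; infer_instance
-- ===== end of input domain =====

-- B replaces A's least-significant-first modulo loop + reverse by a recursive
-- most-significant-first digit decomposition flattened with a comprehension (simpler).


-- ===== PORT A =====
-- the 'while i>=10' loop: collects i%10 into b (least-significant first), i := i//10;
-- returns the final i and the collected list b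
def sdLoopA (i : Int) (b : List Int) : Int × List Int :=
  if _h : i ≥ 10 then
    sdLoopA (PySem.Int.floordiv i 10) (b ++ [PySem.Int.mod i 10])
  else (i, b)
termination_by i.toNat
decreasing_by
  have : PySem.Int.floordiv i 10 = i / 10 := PySem.Int.floordiv_eq_ediv_of_pos (by omega)
  rw [this]; omega

def separateDigits (nums : List Int) : List Int :=
  nums.foldl (fun a i =>
    let p := sdLoopA i []
    (a ++ [p.1]) ++ p.2.reverse) []

-- ===== PORT B =====
-- recursive digits: digits i = [i] if i < 10, else digits (i // 10) ++ [i % 10]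
def sdDigits (i : Int) : List Int :=
  if _h : i < 10 then [i]
  else sdDigits (PySem.Int.floordiv i 10) ++ [PySem.Int.mod i 10]
termination_by i.toNat
decreasing_by
  have : PySem.Int.floordiv i 10 = i / 10 := PySem.Int.floordiv_eq_ediv_of_pos (by omega)
  rw [this]; omega

def separateDigits_alt (nums : List Int) : List Int :=
  nums.flatMap sdDigits

-- ===== PRECONDITION & SPEC =====
def Spec_separateDigits (nums : List Int) (out : List Int) : Prop := out = separateDigits_alt nums
instance (nums : List Int) (out : List Int) : Decidable (Spec_separateDigits nums out) := by unfold Spec_separateDigits; infer_instance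

-- ===== CLAIM (what is proved, stated in full; the proofs are below) =====
def Claim_equal_separateDigits : Prop := ∀ (nums : List Int), Dom_separateDigits nums → Spec_separateDigits nums (separateDigits nums)

-- ===== LEMMAS AND PROOFS =====
-- the accumulator of A's loop is only appended to
theorem sdLoopA_acc (i : Int) : ∀ b : List Int,
    sdLoopA i b = ((sdLoopA i []).1, b ++ (sdLoopA i []).2) := by
  induction i using sdDigits.induct with
  | case1 i h =>
    intro b
    rw [sdLoopA, dif_neg (by omega : ¬ i ≥ 10), sdLoopA, dif_neg (by omega : ¬ i ≥ 10)]
    simp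
  | case2 i h ih =>
    intro b
    have h10 : i ≥ 10 := by omega
    rw [sdLoopA, dif_pos h10, ih]
    conv_rhs => rw [sdLoopA]
    rw [dif_pos h10, ih ([] ++ [PySem.Int.mod i 10])]
    simp

-- A's per-number result (final i, then b reversed) is exactly B's digits
theorem sdLoopA_digits (i : Int) :
    (sdLoopA i []).1 :: (sdLoopA i []).2.reverse = sdDigits i := by
  induction i using sdDigits.induct with
  | case1 i h =>
    rw [sdDigits, dif_pos h, sdLoopA, dif_neg (by omega : ¬ i ≥ 10)]
    simp
  | case2 i h ih =>
    rw [sdDigits, dif_neg h, ← ih,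
        sdLoopA, dif_pos (by omega : i ≥ 10), sdLoopA_acc]
    simp

-- ===== VERDICT (by name: the statement is the Claim_ definition above) =====
theorem separateDigits_spec : Claim_equal_separateDigits := by
  intro nums hD
  clear hD
  show separateDigits nums = separateDigits_alt nums
  unfold separateDigits separateDigits_alt
  induction nums using List.reverseRecOn with
  | nil => rfl
  | append_singleton xs x ih =>
    rw [List.foldl_append, List.flatMap_append, ih]
    simp only [List.foldl_cons, List.foldl_nil, List.flatMap_cons, List.flatMap_nil,
      List.append_nil, List.append_assoc, List.singleton_append]
    rw [← sdLoopA_digits]
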